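-- pv_equiv track=rewrite | github.com/VCasseb/orquestrador_migracao_opensource | src/migrate/core/validate/profile.py | build_profile_sql
-- ===== SOURCE A (Python) =====
-- from typing import Literal
--
-- Dialect = Literal["bigquery", "databricks"]
--
-- _NUMERIC_TYPES_BQ = {"INT64", "FLOAT64", "NUMERIC", "BIGNUMERIC", "FLOAT", "INTEGER"}
--
-- _NUMERIC_TYPES_SPARK = {"INT", "BIGINT", "DOUBLE", "FLOAT", "DECIMAL", "LONG"}
--
-- def _is_numeric(col_type: str, dialect: Dialect) -> bool:
--     base = col_type.upper().split("(")[0].strip()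
--     if dialect == "bigquery":
--         return base in _NUMERIC_TYPES_BQ
--     return any(base.startswith(t) for t in _NUMERIC_TYPES_SPARK)
--
-- def build_profile_sql(
--     fqn: str,
--     columns: list[tuple[str, str]],
--     dialect: Dialect,
-- ) -> str:
--     """Build a single SELECT that returns one row with all profiling metrics.
--
--     Each column produces several aliased aggregates (null_count, distinct_count,
--     min, max, avg). We use a single query to minimize round-trips and DBU cost.
--     """
--     parts: list[str] = ["COUNT(*) AS _row_count"]
--
--     for name, col_type in columns:
--         safe = name.replace("`", "").replace('"', "")
--         ref = f"`{safe}`" if dialect == "bigquery" else f"`{safe}`"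
--         parts.append(f"COUNTIF({ref} IS NULL) AS `{safe}__null_count`" if dialect == "bigquery"
--                      else f"SUM(CASE WHEN {ref} IS NULL THEN 1 ELSE 0 END) AS `{safe}__null_count`")
--         parts.append(f"APPROX_COUNT_DISTINCT({ref}) AS `{safe}__distinct_count`" if dialect == "bigquery"
--                      else f"approx_count_distinct({ref}) AS `{safe}__distinct_count`")
--         if _is_numeric(col_type, dialect):
--             parts.append(f"CAST(MIN({ref}) AS FLOAT64) AS `{safe}__min`" if dialect == "bigquery"
--                          else f"CAST(MIN({ref}) AS DOUBLE) AS `{safe}__min`")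
--             parts.append(f"CAST(MAX({ref}) AS FLOAT64) AS `{safe}__max`" if dialect == "bigquery"
--                          else f"CAST(MAX({ref}) AS DOUBLE) AS `{safe}__max`")
--             parts.append(f"AVG(CAST({ref} AS FLOAT64)) AS `{safe}__avg`" if dialect == "bigquery"
--                          else f"AVG(CAST({ref} AS DOUBLE)) AS `{safe}__avg`")
--
--     quoted = f"`{fqn}`" if dialect == "bigquery" else fqn
--     return f"SELECT {', '.join(parts)} FROM {quoted}"
-- ===== SOURCE B (Python) =====
-- _NUMERIC_TYPES_BQ = {"INT64", "FLOAT64", "NUMERIC", "BIGNUMERIC", "FLOAT", "INTEGER"}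
-- _NUMERIC_TYPES_SPARK = {"INT", "BIGINT", "DOUBLE", "FLOAT", "DECIMAL", "LONG"}
--
--
-- def _is_numeric(col_type, dialect):
--     base = col_type.upper().split("(")[0].strip()
--     if dialect == "bigquery":
--         return base in _NUMERIC_TYPES_BQ
--     return any(base.startswith(t) for t in _NUMERIC_TYPES_SPARK)
--
--
-- def _chunk_bq(safe, numeric):
--     ref = f"`{safe}`"
--     s = (f"COUNTIF({ref} IS NULL) AS `{safe}__null_count`" + ", " +
--          f"APPROX_COUNT_DISTINCT({ref}) AS `{safe}__distinct_count`")
--     if numeric: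
--         s += (", " + f"CAST(MIN({ref}) AS FLOAT64) AS `{safe}__min`" + ", " +
--               f"CAST(MAX({ref}) AS FLOAT64) AS `{safe}__max`" + ", " +
--               f"AVG(CAST({ref} AS FLOAT64)) AS `{safe}__avg`")
--     return s
--
--
-- def _chunk_spark(safe, numeric):
--     ref = f"`{safe}`"
--     s = (f"SUM(CASE WHEN {ref} IS NULL THEN 1 ELSE 0 END) AS `{safe}__null_count`" + ", " +
--          f"approx_count_distinct({ref}) AS `{safe}__distinct_count`")
--     if numeric:
--         s += (", " + f"CAST(MIN({ref}) AS DOUBLE) AS `{safe}__min`" + ", " +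
--               f"CAST(MAX({ref}) AS DOUBLE) AS `{safe}__max`" + ", " +
--               f"AVG(CAST({ref} AS DOUBLE)) AS `{safe}__avg`")
--     return s
--
--
-- def build_profile_sql(fqn, columns, dialect):
--     """Builds the statement as one string back-to-front (no parts list, no join):
--     the dialect is dispatched once to a per-column chunk function, then the columns
--     are walked in reverse, prepending each column's chunk onto the FROM suffix."""
--     bq = dialect == "bigquery"
--     chunk = _chunk_bq if bq else _chunk_spark
--     sql = " FROM " + (f"`{fqn}`" if bq else fqn)
--     for name, col_type in reversed(columns):
--         safe = name.replace("`", "").replace('"', "")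
--         sql = ", " + chunk(safe, _is_numeric(col_type, dialect)) + sql
--     return "SELECT COUNT(*) AS _row_count" + sql
-- ===== Notes on version B (the rewrite author's own statement) =====
-- stated objective: alternative
-- what changed: Replaces the parts-list append loop with inline dialect ternaries plus final ', '.join by a single string built back-to-front: the dialect picks a per-column chunk function once, and a reversed walk over the columns prepends each chunk onto the FROM suffix, so no list and no join is used.
import Mathlib
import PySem

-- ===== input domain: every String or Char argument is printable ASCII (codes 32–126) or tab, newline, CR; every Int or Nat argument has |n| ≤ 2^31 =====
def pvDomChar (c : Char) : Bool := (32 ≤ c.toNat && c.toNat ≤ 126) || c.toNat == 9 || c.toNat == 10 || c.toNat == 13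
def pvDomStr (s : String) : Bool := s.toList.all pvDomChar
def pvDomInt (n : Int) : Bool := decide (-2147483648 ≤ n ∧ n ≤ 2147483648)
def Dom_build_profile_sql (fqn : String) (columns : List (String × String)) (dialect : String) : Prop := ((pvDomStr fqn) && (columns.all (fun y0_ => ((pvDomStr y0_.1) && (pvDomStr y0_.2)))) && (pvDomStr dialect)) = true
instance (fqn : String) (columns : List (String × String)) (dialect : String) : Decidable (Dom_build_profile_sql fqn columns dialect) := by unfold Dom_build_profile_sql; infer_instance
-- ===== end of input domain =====

-- B builds the statement as one string back-to-front (dialect dispatched once to a chunk function, reversed walk prepending onto the FROM suffix) instead of A's parts list + join; objective: alternative decomposition, same cost.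

-- shared module helper _is_numeric (used verbatim by both Pythons)
def pv_is_numeric (col_type : String) (dialect : String) : Bool :=
  let base := PySem.Str.strip (((PySem.Str.split? (PySem.Str.upper col_type) "(").getD []).headD "")
  if dialect == "bigquery" then
    ["INT64", "FLOAT64", "NUMERIC", "BIGNUMERIC", "FLOAT", "INTEGER"].contains base
  else
    ["INT", "BIGINT", "DOUBLE", "FLOAT", "DECIMAL", "LONG"].any (fun t => PySem.Str.startswith base t)

-- ===== PORT A =====
def build_profile_sql (fqn : String) (columns : List (String × String)) (dialect : String) : String :=
  let parts : List String := ["COUNT(*) AS _row_count"]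
  let parts := columns.foldl (fun parts nc =>
    let name := nc.1
    let col_type := nc.2
    let safe := PySem.Str.replace (PySem.Str.replace name "`" "") "\"" ""
    let ref := if dialect == "bigquery" then "`" ++ safe ++ "`" else "`" ++ safe ++ "`"
    let parts := parts ++ [if dialect == "bigquery"
      then "COUNTIF(" ++ ref ++ " IS NULL) AS `" ++ safe ++ "__null_count`"
      else "SUM(CASE WHEN " ++ ref ++ " IS NULL THEN 1 ELSE 0 END) AS `" ++ safe ++ "__null_count`"]
    let parts := parts ++ [if dialect == "bigquery"
      then "APPROX_COUNT_DISTINCT(" ++ ref ++ ") AS `" ++ safe ++ "__distinct_count`"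
      else "approx_count_distinct(" ++ ref ++ ") AS `" ++ safe ++ "__distinct_count`"]
    if pv_is_numeric col_type dialect then
      let parts := parts ++ [if dialect == "bigquery"
        then "CAST(MIN(" ++ ref ++ ") AS FLOAT64) AS `" ++ safe ++ "__min`"
        else "CAST(MIN(" ++ ref ++ ") AS DOUBLE) AS `" ++ safe ++ "__min`"]
      let parts := parts ++ [if dialect == "bigquery"
        then "CAST(MAX(" ++ ref ++ ") AS FLOAT64) AS `" ++ safe ++ "__max`"
        else "CAST(MAX(" ++ ref ++ ") AS DOUBLE) AS `" ++ safe ++ "__max`"]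
      parts ++ [if dialect == "bigquery"
        then "AVG(CAST(" ++ ref ++ " AS FLOAT64)) AS `" ++ safe ++ "__avg`"
        else "AVG(CAST(" ++ ref ++ " AS DOUBLE)) AS `" ++ safe ++ "__avg`"]
    else parts) parts
  let quoted := if dialect == "bigquery" then "`" ++ fqn ++ "`" else fqn
  "SELECT " ++ PySem.Str.join ", " parts ++ " FROM " ++ quoted

-- ===== PORT B =====
def pv_chunk_bq (safe : String) (numeric : Bool) : String :=
  let ref := "`" ++ safe ++ "`"
  let s := ("COUNTIF(" ++ ref ++ " IS NULL) AS `" ++ safe ++ "__null_count`") ++ ", " ++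
           ("APPROX_COUNT_DISTINCT(" ++ ref ++ ") AS `" ++ safe ++ "__distinct_count`")
  if numeric then
    s ++ (", " ++ ("CAST(MIN(" ++ ref ++ ") AS FLOAT64) AS `" ++ safe ++ "__min`") ++ ", " ++
          ("CAST(MAX(" ++ ref ++ ") AS FLOAT64) AS `" ++ safe ++ "__max`") ++ ", " ++
          ("AVG(CAST(" ++ ref ++ " AS FLOAT64)) AS `" ++ safe ++ "__avg`"))
  else s

def pv_chunk_spark (safe : String) (numeric : Bool) : String :=
  let ref := "`" ++ safe ++ "`"
  let s := ("SUM(CASE WHEN " ++ ref ++ " IS NULL THEN 1 ELSE 0 END) AS `" ++ safe ++ "__null_count`") ++ ", " ++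
           ("approx_count_distinct(" ++ ref ++ ") AS `" ++ safe ++ "__distinct_count`")
  if numeric then
    s ++ (", " ++ ("CAST(MIN(" ++ ref ++ ") AS DOUBLE) AS `" ++ safe ++ "__min`") ++ ", " ++
          ("CAST(MAX(" ++ ref ++ ") AS DOUBLE) AS `" ++ safe ++ "__max`") ++ ", " ++
          ("AVG(CAST(" ++ ref ++ " AS DOUBLE)) AS `" ++ safe ++ "__avg`"))
  else s

def build_profile_sql_alt (fqn : String) (columns : List (String × String)) (dialect : String) : String :=
  let bq := dialect == "bigquery"
  let chunk := if bq then pv_chunk_bq else pv_chunk_spark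
  let sql := " FROM " ++ (if bq then "`" ++ fqn ++ "`" else fqn)
  let sql := columns.reverse.foldl (fun sql nc =>
    let safe := PySem.Str.replace (PySem.Str.replace nc.1 "`" "") "\"" ""
    ", " ++ chunk safe (pv_is_numeric nc.2 dialect) ++ sql) sql
  "SELECT COUNT(*) AS _row_count" ++ sql

-- ===== PRECONDITION & SPEC =====
def Spec_build_profile_sql (fqn : String) (columns : List (String × String)) (dialect : String) (out : String) : Prop := out = build_profile_sql_alt fqn columns dialect
instance (fqn : String) (columns : List (String × String)) (dialect : String) (out : String) : Decidable (Spec_build_profile_sql fqn columns dialect out) := by unfold Spec_build_profile_sql; infer_instance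

-- ===== CLAIM (what is proved, stated in full; the proofs are below) =====
def Claim_equal_build_profile_sql : Prop := ∀ (fqn : String) (columns : List (String × String)) (dialect : String), Dom_build_profile_sql fqn columns dialect → Spec_build_profile_sql fqn columns dialect (build_profile_sql fqn columns dialect)

-- ===== LEMMAS AND PROOFS =====

theorem sj_cons_cons (a b : String) (l : List String) :
    PySem.Str.join ", " (a :: b :: l) = a ++ ", " ++ PySem.Str.join ", " (b :: l) := by
  simp [PySem.Str.join, PySem.Chars.join_cons_cons, String.ofList_append]
  rw [String.append_assoc]
  congr 1
  rw [show (", ":String) = String.ofList [',',' '] from rfl, ← String.ofList_append]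
  rfl

theorem sj_singleton (a : String) : PySem.Str.join ", " [a] = a := by
  simp [PySem.Str.join, PySem.Chars.join_singleton]

-- A's per-column list of fragments
def pvCol (dialect : String) (nc : String × String) : List String :=
  let safe := PySem.Str.replace (PySem.Str.replace nc.1 "`" "") "\"" ""
  let ref := if dialect == "bigquery" then "`" ++ safe ++ "`" else "`" ++ safe ++ "`"
  [if dialect == "bigquery"
     then "COUNTIF(" ++ ref ++ " IS NULL) AS `" ++ safe ++ "__null_count`"
     else "SUM(CASE WHEN " ++ ref ++ " IS NULL THEN 1 ELSE 0 END) AS `" ++ safe ++ "__null_count`",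
   if dialect == "bigquery"
     then "APPROX_COUNT_DISTINCT(" ++ ref ++ ") AS `" ++ safe ++ "__distinct_count`"
     else "approx_count_distinct(" ++ ref ++ ") AS `" ++ safe ++ "__distinct_count`"]
  ++ (if pv_is_numeric nc.2 dialect then
   [if dialect == "bigquery"
      then "CAST(MIN(" ++ ref ++ ") AS FLOAT64) AS `" ++ safe ++ "__min`"
      else "CAST(MIN(" ++ ref ++ ") AS DOUBLE) AS `" ++ safe ++ "__min`",
    if dialect == "bigquery"
      then "CAST(MAX(" ++ ref ++ ") AS FLOAT64) AS `" ++ safe ++ "__max`"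
      else "CAST(MAX(" ++ ref ++ ") AS DOUBLE) AS `" ++ safe ++ "__max`",
    if dialect == "bigquery"
      then "AVG(CAST(" ++ ref ++ " AS FLOAT64)) AS `" ++ safe ++ "__avg`"
      else "AVG(CAST(" ++ ref ++ " AS DOUBLE)) AS `" ++ safe ++ "__avg`"]
   else [])

theorem pv_foldl_eq_flatMap (dialect : String) (columns : List (String × String)) (acc : List String) :
    columns.foldl (fun parts nc =>
      let name := nc.1
      let col_type := nc.2
      let safe := PySem.Str.replace (PySem.Str.replace name "`" "") "\"" ""
      let ref := if dialect == "bigquery" then "`" ++ safe ++ "`" else "`" ++ safe ++ "`"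
      let parts := parts ++ [if dialect == "bigquery"
        then "COUNTIF(" ++ ref ++ " IS NULL) AS `" ++ safe ++ "__null_count`"
        else "SUM(CASE WHEN " ++ ref ++ " IS NULL THEN 1 ELSE 0 END) AS `" ++ safe ++ "__null_count`"]
      let parts := parts ++ [if dialect == "bigquery"
        then "APPROX_COUNT_DISTINCT(" ++ ref ++ ") AS `" ++ safe ++ "__distinct_count`"
        else "approx_count_distinct(" ++ ref ++ ") AS `" ++ safe ++ "__distinct_count`"]
      if pv_is_numeric col_type dialect then
        let parts := parts ++ [if dialect == "bigquery"
          then "CAST(MIN(" ++ ref ++ ") AS FLOAT64) AS `" ++ safe ++ "__min`"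
          else "CAST(MIN(" ++ ref ++ ") AS DOUBLE) AS `" ++ safe ++ "__min`"]
        let parts := parts ++ [if dialect == "bigquery"
          then "CAST(MAX(" ++ ref ++ ") AS FLOAT64) AS `" ++ safe ++ "__max`"
          else "CAST(MAX(" ++ ref ++ ") AS DOUBLE) AS `" ++ safe ++ "__max`"]
        parts ++ [if dialect == "bigquery"
          then "AVG(CAST(" ++ ref ++ " AS FLOAT64)) AS `" ++ safe ++ "__avg`"
          else "AVG(CAST(" ++ ref ++ " AS DOUBLE)) AS `" ++ safe ++ "__avg`"]
      else parts) acc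
    = acc ++ columns.flatMap (pvCol dialect) := by
  induction columns generalizing acc with
  | nil => simp
  | cons nc rest ih =>
    simp only [List.foldl_cons, List.flatMap_cons, ih]
    rw [← List.append_assoc]
    congr 1
    by_cases hn : pv_is_numeric nc.2 dialect <;>
      simp [pvCol, hn]

-- B's chunk for a column under a given dialect
def pvChunkOf (dialect : String) (nc : String × String) : String :=
  (if dialect == "bigquery" then pv_chunk_bq else pv_chunk_spark)
    (PySem.Str.replace (PySem.Str.replace nc.1 "`" "") "\"" "")
    (pv_is_numeric nc.2 dialect)

theorem pv_merge_distinct (x : String) :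
    "__distinct_count`" ++ (", " ++ x) = "__distinct_count`, " ++ x := by
  rw [← String.append_assoc]
  congr 1

theorem pv_join_eq_foldr (dialect : String) (columns : List (String × String)) (x : String) :
    PySem.Str.join ", " (x :: columns.flatMap (pvCol dialect))
      = x ++ columns.foldr (fun nc acc => ", " ++ pvChunkOf dialect nc ++ acc) "" := by
  induction columns generalizing x with
  | nil => simp [sj_singleton]
  | cons nc rest ih =>
    simp only [List.flatMap_cons, List.foldr_cons]
    by_cases hb : dialect == "bigquery" <;>
      by_cases hn : pv_is_numeric nc.2 dialect <;>
        simp only [pvCol, hb, hn, Bool.false_eq_true, if_true, if_false,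
          List.cons_append, List.nil_append, List.append_nil] <;>
        · first
          | (rw [sj_cons_cons, sj_cons_cons, sj_cons_cons, sj_cons_cons, sj_cons_cons, ih]
             simp [pvChunkOf, pv_chunk_bq, pv_chunk_spark, hb, hn, String.append_assoc, pv_merge_distinct])
          | (rw [sj_cons_cons, sj_cons_cons, ih]
             simp [pvChunkOf, pv_chunk_bq, pv_chunk_spark, hb, hn, String.append_assoc, pv_merge_distinct])

theorem pv_foldr_init (dialect : String) (columns : List (String × String)) (s : String) :
    columns.foldr (fun nc acc => ", " ++ pvChunkOf dialect nc ++ acc) s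
      = columns.foldr (fun nc acc => ", " ++ pvChunkOf dialect nc ++ acc) "" ++ s := by
  induction columns with
  | nil => simp
  | cons nc rest ih =>
    simp only [List.foldr_cons]
    rw [ih]
    simp [String.append_assoc]

theorem build_profile_sql_eq_alt (fqn : String) (columns : List (String × String)) (dialect : String) :
    build_profile_sql fqn columns dialect = build_profile_sql_alt fqn columns dialect := by
  unfold build_profile_sql build_profile_sql_alt
  simp only [pv_foldl_eq_flatMap, List.singleton_append, List.foldl_reverse]
  rw [show (List.foldr (fun nc sql => ", " ++
        (if dialect == "bigquery" then pv_chunk_bq else pv_chunk_spark)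
          (PySem.Str.replace (PySem.Str.replace nc.1 "`" "") "\"" "")
          (pv_is_numeric nc.2 dialect) ++ sql)) = (List.foldr (fun nc acc => ", " ++ pvChunkOf dialect nc ++ acc)) from rfl]
  rw [pv_join_eq_foldr]
  conv_rhs => rw [pv_foldr_init dialect columns]
  have hx : ∀ X : String, "SELECT " ++ ("COUNT(*) AS _row_count" ++ X)
      = "SELECT COUNT(*) AS _row_count" ++ X := by
    intro X
    rw [← String.append_assoc]
    rfl
  simp [String.append_assoc, hx]

-- ===== VERDICT (by name: the statement is the Claim_ definition above) =====
theorem build_profile_sql_spec : Claim_equal_build_profile_sql := by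
  intro fqn columns dialect _
  exact build_profile_sql_eq_alt fqn columns dialect
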